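-- pv_equiv track=rewrite | github.com/bartoszkruba/advent_of_code_2020 | day_6/main.py | parse_forms
-- ===== SOURCE A (Python) =====
-- from string import ascii_lowercase
--
-- def parse_forms(inputs):
--     forms = []
--     form = {letter: 0 for letter in ascii_lowercase}
--     form['total'] = 0
--
--     for input in inputs:
--         if len(input) == 0:
--             forms.append(form)
--             form = {letter: 0 for letter in ascii_lowercase}
--             form['total'] = 0
--         else:
--             form['total'] += 1
--             for letter in input:
--                 form[letter] += 1
--     forms.append(form)
--     return forms
-- ===== SOURCE B (Python) =====
-- from string import ascii_lowercase
--
--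
-- def parse_forms(inputs):
--     # phase 1: partition lines into groups (an empty line ends a group)
--     groups = []
--     current = []
--     for line in inputs:
--         if line:
--             current.append(line)
--         else:
--             groups.append(current)
--             current = []
--     groups.append(current)
--
--     # phase 2: count each group independently
--     def count(group):
--         form = {letter: 0 for letter in ascii_lowercase}
--         form['total'] = len(group)
--         for line in group:
--             for letter in line:
--                 form[letter] += 1
--         return form
--
--     return [count(group) for group in groups]
-- ===== Notes on version B (the rewrite author's own statement) =====
-- stated objective: alternative
-- what changed: B splits the work into two separate phases -- first partition the lines into groups at empty lines, then map each group to its counting dict (total set once from the group length) -- instead of A's single pass that mutates one running dict and resets it on empty lines.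
import Mathlib
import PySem

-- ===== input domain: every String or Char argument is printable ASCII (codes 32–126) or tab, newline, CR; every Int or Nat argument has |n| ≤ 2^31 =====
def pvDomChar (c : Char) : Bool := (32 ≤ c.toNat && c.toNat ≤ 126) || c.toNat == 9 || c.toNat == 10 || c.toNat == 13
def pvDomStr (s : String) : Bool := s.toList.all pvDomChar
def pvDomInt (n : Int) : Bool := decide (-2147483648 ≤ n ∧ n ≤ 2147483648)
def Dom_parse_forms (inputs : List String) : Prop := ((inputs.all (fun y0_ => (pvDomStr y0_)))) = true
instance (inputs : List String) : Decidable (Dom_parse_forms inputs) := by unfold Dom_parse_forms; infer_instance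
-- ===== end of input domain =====

-- B re-decomposes A's single mutating pass into two phases (partition into groups, then count each
-- group); same cost, alternative structure. Equivalence is about return values (neither mutates input).

-- ===== PORT A =====
-- A: one running dict, reset at each empty line; letters a..z inserted first, then 'total'.
def pvLetters : List Char := "abcdefghijklmnopqrstuvwxyz".toList

def pvLetterDict : PySem.Dict String Int :=
  pvLetters.foldl (fun d c => d.insert (String.ofList [c]) 0) PySem.Dict.empty

def pvFreshForm : PySem.Dict String Int :=
  pvLetterDict.insert "total" 0

-- the body of A's else-branch: form['total'] += 1; for letter in input: form[letter] += 1
def pvFormStep (form : PySem.Dict String Int) (line : String) : PySem.Dict String Int :=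
  line.toList.foldl (fun f c => f.modify (String.ofList [c]) 0 (· + 1))
    (form.modify "total" 0 (· + 1))

def pvAStep (st : List (List (String × Int)) × PySem.Dict String Int) (line : String) :
    List (List (String × Int)) × PySem.Dict String Int :=
  if PySem.Str.len line == 0 then (st.1 ++ [st.2.items], pvFreshForm)
  else (st.1, pvFormStep st.2 line)

def parse_forms (inputs : List String) : List (List (String × Int)) :=
  let st := inputs.foldl pvAStep ([], pvFreshForm)
  st.1 ++ [st.2.items]

-- ===== PORT B =====
-- B phase 1: partition the lines into groups at empty lines
def pvBStep (st : List (List String) × List String) (line : String) :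
    List (List String) × List String :=
  if line.toList ≠ [] then (st.1, st.2 ++ [line])
  else (st.1 ++ [st.2], [])

def pvGroups (inputs : List String) : List (List String) :=
  let st := inputs.foldl pvBStep ([], [])
  st.1 ++ [st.2]

-- B phase 2: count one group
def pvCountGroup (g : List String) : PySem.Dict String Int :=
  let form := pvLetterDict.insert "total" (PySem.List.len g)
  g.foldl (fun f line =>
    line.toList.foldl (fun f c => f.modify (String.ofList [c]) 0 (· + 1)) f) form

def parse_forms_alt (inputs : List String) : List (List (String × Int)) :=
  (pvGroups inputs).map (fun g => (pvCountGroup g).items)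

-- ===== PRECONDITION & SPEC =====
-- Pre_ excludes inputs where some line contains a character other than a lowercase ASCII letter:
-- on those Python A raises KeyError (form[letter] on a missing key).
def Pre_parse_forms (inputs : List String) : Prop :=
  (inputs.all (fun s => s.toList.all (fun c => 97 ≤ c.toNat && c.toNat ≤ 122))) = true
instance (inputs : List String) : Decidable (Pre_parse_forms inputs) := by
  unfold Pre_parse_forms; infer_instance

def pvWitness_parse_forms : List String := []

def Spec_parse_forms (inputs : List String) (out : List (List (String × Int))) : Prop :=
  out = parse_forms_alt inputs
instance (inputs : List String) (out : List (List (String × Int))) :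
    Decidable (Spec_parse_forms inputs out) := by unfold Spec_parse_forms; infer_instance

-- ===== CLAIM (what is proved, stated in full; the proofs are below) =====
def Claim_equal_parse_forms : Prop := ∀ (inputs : List String), Dom_parse_forms inputs →
  Pre_parse_forms inputs → Spec_parse_forms inputs (parse_forms inputs)

-- ===== LEMMAS AND PROOFS =====

set_option maxRecDepth 40000 in
lemma pvLetters_map : pvLetters.map Char.toNat = List.range' 97 26 := by decide

lemma pvMem_letters (c : Char) (h1 : 97 ≤ c.toNat) (h2 : c.toNat ≤ 122) : c ∈ pvLetters := by
  have hm : c.toNat ∈ List.range' 97 26 := by rw [List.mem_range'_1]; omega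
  rw [← pvLetters_map] at hm
  obtain ⟨a, ha, haeq⟩ := List.mem_map.mp hm
  rwa [Char.ext (UInt32.toNat_inj.mp haeq)] at ha

-- a dict that (still) has the 'total' key and all 26 one-letter keys
def pvGood (d : PySem.Dict String Int) : Prop :=
  d.contains "total" = true ∧ ∀ c ∈ pvLetters, d.contains (String.ofList [c]) = true

lemma pvKey_ne_total : ∀ c ∈ pvLetters, String.ofList [c] ≠ "total" := by
  intro c _ h
  have h2 : [c] = "total".toList := by simpa using congrArg String.toList h
  have h3 : [c].length = 5 := by rw [h2]; rfl
  simp at h3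

lemma pvLetterDict_contains : ∀ c ∈ pvLetters, pvLetterDict.contains (String.ofList [c]) = true := by
  intro c hc
  rw [PySem.Dict.contains_iff_mem_keys]
  unfold pvLetterDict
  rw [PySem.Dict.keys_foldl_insert_key (key := fun c => String.ofList [c])]
  rw [PySem.Set.mem_update]
  exact Or.inr (List.mem_map_of_mem hc)

lemma pvGood_base (n : Int) : pvGood (pvLetterDict.insert "total" n) := by
  constructor
  · exact PySem.Dict.contains_insert_self _ _ _
  · intro c hc
    rw [PySem.Dict.contains_insert]
    simp [pvLetterDict_contains c hc]

lemma pvGood_modify (d : PySem.Dict String Int) (k : String) (d0 : Int) (f : Int → Int)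
    (h : pvGood d) : pvGood (d.modify k d0 f) := by
  obtain ⟨h1, h2⟩ := h
  constructor
  · simp [PySem.Dict.modify, PySem.Dict.contains_insert, h1]
  · intro c hc
    simp [PySem.Dict.modify, PySem.Dict.contains_insert, h2 c hc]

lemma pvGood_chars (cs : List Char) (d : PySem.Dict String Int) (h : pvGood d) :
    pvGood (cs.foldl (fun f c => f.modify (String.ofList [c]) 0 (· + 1)) d) := by
  induction cs generalizing d with
  | nil => exact h
  | cons c cs ih => exact ih _ (pvGood_modify _ _ _ _ h)

lemma pvInsert_comm (d : PySem.Dict String Int) (k k' : String) (v v' : Int)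
    (hne : k ≠ k') (hk : d.contains k = true) (hk' : d.contains k' = true) :
    (d.insert k v).insert k' v' = (d.insert k' v').insert k v := by
  have hk2 : (d.insert k v).contains k' = true := by
    rw [PySem.Dict.contains_insert]; simp [hk']
  have hk2' : (d.insert k' v').contains k = true := by
    rw [PySem.Dict.contains_insert]; simp [hk]
  apply PySem.Dict.ext
  rw [PySem.Dict.items_insert_of_contains _ _ hk2, PySem.Dict.items_insert_of_contains _ _ hk2',
      PySem.Dict.items_insert_of_contains _ _ hk, PySem.Dict.items_insert_of_contains _ _ hk',
      List.map_map, List.map_map]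
  apply List.map_congr_left
  intro p _
  simp only [Function.comp]
  by_cases h1 : p.1 = k <;> by_cases h2 : p.1 = k' <;>
    simp_all [Ne.symm hne]

lemma pvModify_comm (d : PySem.Dict String Int) (k k' : String) (f g : Int → Int)
    (hne : k ≠ k') (hk : d.contains k = true) (hk' : d.contains k' = true) :
    (d.modify k 0 f).modify k' 0 g = (d.modify k' 0 g).modify k 0 f := by
  simp only [PySem.Dict.modify]
  rw [PySem.Dict.getD_insert_of_ne _ _ _ (Ne.symm hne), PySem.Dict.getD_insert_of_ne _ _ _ hne]
  exact pvInsert_comm d k k' _ _ hne hk hk'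

-- pushing the 'total' increment through one line's character loop
lemma pvPush_chars (cs : List Char) (hcs : ∀ c ∈ cs, c ∈ pvLetters) :
    ∀ d : PySem.Dict String Int, pvGood d →
    (cs.foldl (fun f c => f.modify (String.ofList [c]) 0 (· + 1)) d).modify "total" 0 (· + 1)
      = cs.foldl (fun f c => f.modify (String.ofList [c]) 0 (· + 1)) (d.modify "total" 0 (· + 1)) := by
  induction cs with
  | nil => intro d _; rfl
  | cons c cs ih =>
    intro d hd
    have hc : c ∈ pvLetters := hcs c (List.mem_cons_self ..)
    have hrest : ∀ c ∈ cs, c ∈ pvLetters := fun x hx => hcs x (List.mem_cons_of_mem _ hx)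
    simp only [List.foldl_cons]
    rw [ih hrest _ (pvGood_modify _ _ _ _ hd),
        pvModify_comm d (String.ofList [c]) "total" _ _ (pvKey_ne_total c hc) (hd.2 c hc) hd.1]

-- pushing the 'total' increment through a whole group's loop
lemma pvPush_lines (g : List String) (hg : ∀ l ∈ g, ∀ c ∈ l.toList, c ∈ pvLetters) :
    ∀ d : PySem.Dict String Int, pvGood d →
    (g.foldl (fun f line =>
        line.toList.foldl (fun f c => f.modify (String.ofList [c]) 0 (· + 1)) f) d).modify "total" 0 (· + 1)
      = g.foldl (fun f line =>
        line.toList.foldl (fun f c => f.modify (String.ofList [c]) 0 (· + 1)) f)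
          (d.modify "total" 0 (· + 1)) := by
  induction g with
  | nil => intro d _; rfl
  | cons l g ih =>
    intro d hd
    have hl : ∀ c ∈ l.toList, c ∈ pvLetters := hg l (List.mem_cons_self ..)
    have hrest : ∀ l' ∈ g, ∀ c ∈ l'.toList, c ∈ pvLetters :=
      fun x hx => hg x (List.mem_cons_of_mem _ hx)
    simp only [List.foldl_cons]
    rw [ih hrest _ (pvGood_chars _ _ hd), pvPush_chars l.toList hl d hd]

lemma pvFresh_eq_count_nil : pvFreshForm = pvCountGroup [] := rfl

lemma pvStep_eq_count_append (g : List String) (l : String)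
    (hg : ∀ l' ∈ g, ∀ c ∈ l'.toList, c ∈ pvLetters) :
    pvFormStep (pvCountGroup g) l = pvCountGroup (g ++ [l]) := by
  have hlen : PySem.List.len (g ++ [l]) = PySem.List.len g + 1 := by
    simp [PySem.List.len_eq]
  have hbase : (pvLetterDict.insert "total" (PySem.List.len g)).modify "total" 0 (· + 1)
      = pvLetterDict.insert "total" (PySem.List.len (g ++ [l])) := by
    rw [hlen]
    simp only [PySem.Dict.modify, PySem.Dict.getD_insert_self, PySem.Dict.insert_insert_self]
  unfold pvFormStep pvCountGroup
  simp only [List.foldl_append, List.foldl_cons, List.foldl_nil]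
  rw [pvPush_lines g hg _ (pvGood_base _), hbase]

lemma pvLoop_eq (rest : List String) (hrest : ∀ s ∈ rest, ∀ c ∈ s.toList, c ∈ pvLetters) :
    ∀ (gs : List (List String)) (cur : List String),
    (∀ l ∈ cur, ∀ c ∈ l.toList, c ∈ pvLetters) →
    rest.foldl pvAStep (gs.map (fun g => (pvCountGroup g).items), pvCountGroup cur)
      = ((rest.foldl pvBStep (gs, cur)).1.map (fun g => (pvCountGroup g).items),
         pvCountGroup (rest.foldl pvBStep (gs, cur)).2) := by
  induction rest with
  | nil => intro gs cur _; rfl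
  | cons line rest ih =>
    intro gs cur hcur
    have hline : ∀ c ∈ line.toList, c ∈ pvLetters :=
      hrest line (List.mem_cons_self ..)
    have hrest' : ∀ s ∈ rest, ∀ c ∈ s.toList, c ∈ pvLetters :=
      fun x hx => hrest x (List.mem_cons_of_mem _ hx)
    simp only [List.foldl_cons]
    by_cases hempty : line = ""
    · have hA : pvAStep (gs.map (fun g => (pvCountGroup g).items), pvCountGroup cur) line
          = ((gs ++ [cur]).map (fun g => (pvCountGroup g).items), pvCountGroup []) := by
        unfold pvAStep
        simp [hempty, PySem.Str.len_eq, pvFresh_eq_count_nil]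
      have hB : pvBStep (gs, cur) line = (gs ++ [cur], []) := by
        unfold pvBStep; simp [hempty]
      rw [hA, hB]
      exact ih hrest' (gs ++ [cur]) [] (by intro l hl; cases hl)
    · have hcond : (PySem.Str.len line == 0) = false := by
        rw [PySem.Str.len_eq]
        simpa [String.toList_inj] using hempty
      have hA : pvAStep (gs.map (fun g => (pvCountGroup g).items), pvCountGroup cur) line
          = (gs.map (fun g => (pvCountGroup g).items), pvCountGroup (cur ++ [line])) := by
        unfold pvAStep
        simp [hempty, pvStep_eq_count_append cur line hcur]
      have hB : pvBStep (gs, cur) line = (gs, cur ++ [line]) := by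
        unfold pvBStep
        simp [String.toList_eq_nil_iff, hempty]
      rw [hA, hB]
      refine ih hrest' gs (cur ++ [line]) ?_
      intro l hl
      rcases List.mem_append.mp hl with h | h
      · exact hcur l h
      · rw [List.mem_singleton.mp h]; exact hline

-- ===== VERDICT (by name: the statement is the Claim_ definition above) =====
theorem parse_forms_spec : Claim_equal_parse_forms := by
  intro inputs _ hpre0
  unfold Pre_parse_forms at hpre0
  simp only [List.all_eq_true, Bool.and_eq_true, decide_eq_true_eq] at hpre0
  have hpre : ∀ s ∈ inputs, ∀ c ∈ s.toList, c ∈ pvLetters := fun s hs c hc =>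
    pvMem_letters c (hpre0 s hs c hc).1 (hpre0 s hs c hc).2
  unfold Spec_parse_forms parse_forms parse_forms_alt pvGroups
  have h := pvLoop_eq inputs hpre [] [] (by intro l hl; cases hl)
  simp only [List.map_nil] at h
  rw [pvFresh_eq_count_nil, h]
  simp [List.map_append]
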